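-- pv_equiv track=rewrite | github.com/odeardika/enviroment-songs-finder | system.py | wordSort
-- ===== SOURCE A (Python) =====
-- def wordSort(lists):
--     words = []
--     for Doc in lists:
--         for word in Doc:
--             if word not in words:
--                 words.append(word)
--     words.sort()
--
--     return words
-- ===== SOURCE B (Python) =====
-- def wordSort(lists):
--     flat = sorted(word for doc in lists for word in doc)
--     out = []
--     for w in flat:
--         if not out or w != out[-1]:
--             out.append(w)
--     return out
-- ===== Notes on version B (the rewrite author's own statement) =====
-- stated objective: faster
-- what changed: A dedups first with a linear membership scan per word and then sorts; B flattens everything, sorts once, and dedups in one adjacency pass over the sorted list.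
import Mathlib
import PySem

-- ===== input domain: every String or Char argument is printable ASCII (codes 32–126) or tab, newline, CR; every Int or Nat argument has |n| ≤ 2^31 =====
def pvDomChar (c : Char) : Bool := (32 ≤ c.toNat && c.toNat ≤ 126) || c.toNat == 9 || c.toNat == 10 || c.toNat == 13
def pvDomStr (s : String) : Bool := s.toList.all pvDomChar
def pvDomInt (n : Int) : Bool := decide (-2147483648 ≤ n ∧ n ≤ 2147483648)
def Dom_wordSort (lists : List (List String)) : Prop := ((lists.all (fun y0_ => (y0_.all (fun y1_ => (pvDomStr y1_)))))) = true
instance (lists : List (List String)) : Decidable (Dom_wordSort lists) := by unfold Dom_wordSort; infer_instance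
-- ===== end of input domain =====

-- B flattens all docs, sorts once, then removes duplicates in a single adjacency pass,
-- replacing A's per-word membership scan (dedup-then-sort becomes sort-then-dedup).


-- ===== PORT A =====
def wordSort (lists : List (List String)) : List String :=
  let words := lists.foldl
    (fun words Doc =>
      Doc.foldl (fun ws word => if word ∈ ws then ws else ws ++ [word]) words) []
  PySem.List.sorted words (fun x => x) false

-- ===== PORT B =====
def wordSort_alt (lists : List (List String)) : List String :=
  let flat := PySem.List.sorted lists.flatten (fun x => x) false
  flat.foldl (fun out w => if out.getLast? = some w then out else out ++ [w]) []

-- ===== PRECONDITION & SPEC =====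
def Spec_wordSort (lists : List (List String)) (out : List String) : Prop := out = wordSort_alt lists
instance (lists : List (List String)) (out : List String) : Decidable (Spec_wordSort lists out) := by unfold Spec_wordSort; infer_instance

-- ===== CLAIM (what is proved, stated in full; the proofs are below) =====
def Claim_equal_wordSort : Prop := ∀ (lists : List (List String)), Dom_wordSort lists → Spec_wordSort lists (wordSort lists)

-- ===== LEMMAS AND PROOFS =====

-- A's inner dedup-append step
def wsStep (ws : List String) (word : String) : List String :=
  if word ∈ ws then ws else ws ++ [word]

lemma mem_foldl_wsStep (doc : List String) (acc : List String) (x : String) :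
    x ∈ doc.foldl wsStep acc ↔ x ∈ acc ∨ x ∈ doc := by
  induction doc generalizing acc with
  | nil => simp
  | cons w t ih =>
    simp only [List.foldl_cons, ih, wsStep]
    split_ifs with h
    · constructor
      · rintro (h1 | h1)
        · exact Or.inl h1
        · exact Or.inr (List.mem_cons_of_mem _ h1)
      · rintro (h1 | h1)
        · exact Or.inl h1
        · rcases List.mem_cons.mp h1 with h1 | h1
          · exact Or.inl (h1 ▸ h)
          · exact Or.inr h1
    · simp only [List.mem_append, List.mem_cons]
      tauto

lemma nodup_foldl_wsStep (doc : List String) (acc : List String) (h : acc.Nodup) :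
    (doc.foldl wsStep acc).Nodup := by
  induction doc generalizing acc with
  | nil => exact h
  | cons w t ih =>
    simp only [List.foldl_cons, wsStep]
    split_ifs with hm
    · exact ih acc h
    · refine ih _ ?_
      simp only [List.nodup_append, List.nodup_singleton, true_and, h]
      intro a ha b hb
      rw [List.mem_singleton] at hb
      subst hb
      exact fun hc => hm (hc ▸ ha)

lemma mem_foldl_outer (lists : List (List String)) (acc : List String) (x : String) :
    x ∈ lists.foldl (fun ws Doc => Doc.foldl wsStep ws) acc ↔ x ∈ acc ∨ x ∈ lists.flatten := by
  induction lists generalizing acc with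
  | nil => simp
  | cons d t ih =>
    simp only [List.foldl_cons, ih, mem_foldl_wsStep, List.flatten_cons, List.mem_append]
    tauto

lemma nodup_foldl_outer (lists : List (List String)) (acc : List String) (h : acc.Nodup) :
    (lists.foldl (fun ws Doc => Doc.foldl wsStep ws) acc).Nodup := by
  induction lists generalizing acc with
  | nil => exact h
  | cons d t ih => exact ih _ (nodup_foldl_wsStep d acc h)

-- the adjacency pass seen as structural recursion (proof-side view of B's loop)
def adjDedup (prev : String) : List String → List String
  | [] => []
  | w :: t => if w = prev then adjDedup w t else w :: adjDedup w t

lemma mem_cons_adjDedup (l : List String) (p x : String) :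
    x ∈ p :: adjDedup p l ↔ x ∈ p :: l := by
  induction l generalizing p with
  | nil => simp [adjDedup]
  | cons w t ih =>
    have h1 := ih w
    simp only [adjDedup]
    split_ifs with h
    · subst h
      simp only [List.mem_cons] at h1 ⊢
      tauto
    · simp only [List.mem_cons] at h1 ⊢
      tauto

lemma pairwise_cons_adjDedup (l : List String) (p : String)
    (h : (p :: l).Pairwise (· ≤ ·)) : (p :: adjDedup p l).Pairwise (· < ·) := by
  induction l generalizing p with
  | nil => simp [adjDedup]
  | cons w t ih =>
    rcases List.pairwise_cons.mp h with ⟨hp, ht⟩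
    simp only [adjDedup]
    split_ifs with he
    · subst he
      exact ih w ht
    · have hpw : p < w := lt_of_le_of_ne (hp w List.mem_cons_self) (Ne.symm he)
      refine List.pairwise_cons.mpr ⟨?_, ih w ht⟩
      intro z hz
      have hz' : z ∈ w :: t := (mem_cons_adjDedup t w z).mp hz
      rcases List.mem_cons.mp hz' with hz' | hz'
      · exact hz' ▸ hpw
      · exact lt_of_lt_of_le hpw ((List.pairwise_cons.mp ht).1 z hz')

-- B's foldl equals the structural adjacency pass
lemma foldl_eq_adjDedup (l acc : List String) (p : String) (h : acc.getLast? = some p) :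
    l.foldl (fun out w => if out.getLast? = some w then out else out ++ [w]) acc
      = acc ++ adjDedup p l := by
  induction l generalizing acc p with
  | nil => simp [adjDedup]
  | cons w t ih =>
    simp only [List.foldl_cons, adjDedup]
    by_cases he : w = p
    · subst he
      rw [if_pos h, if_pos rfl, ih acc w h]
    · rw [if_neg (by rw [h]; exact fun hc => he (Option.some.inj hc).symm), if_neg he,
        ih (acc ++ [w]) w (by simp), List.append_assoc]
      rfl

lemma foldl_nil_eq_adjDedup (l : List String) :
    l.foldl (fun out w => if out.getLast? = some w then out else out ++ [w]) []
      = match l with | [] => [] | w :: t => w :: adjDedup w t := by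
  cases l with
  | nil => rfl
  | cons w t =>
    simp only [List.foldl_cons, List.nil_append]
    rw [if_neg (by simp), foldl_eq_adjDedup t [w] w (by simp)]
    rfl

-- ===== VERDICT (by name: the statement is the Claim_ definition above) =====
theorem wordSort_spec : Claim_equal_wordSort := by
  intro lists _
  unfold Spec_wordSort wordSort wordSort_alt
  simp only []
  set words := lists.foldl (fun ws Doc => Doc.foldl (fun ws word => if word ∈ ws then ws else ws ++ [word]) ws) [] with hwords
  have hwords' : words = lists.foldl (fun ws Doc => Doc.foldl wsStep ws) [] := rfl
  have hmemw : ∀ x, x ∈ words ↔ x ∈ lists.flatten := by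
    intro x; rw [hwords', mem_foldl_outer]; simp
  have hnodw : words.Nodup := by rw [hwords']; exact nodup_foldl_outer _ _ (by simp)
  rw [foldl_nil_eq_adjDedup]
  rcases hs : PySem.List.sorted lists.flatten (fun x => x) false with _ | ⟨w, t⟩
  · have hfl : lists.flatten = [] := (PySem.List.sorted_eq_nil_iff _ _ _).mp hs
    have : words = [] := by
      apply List.eq_nil_iff_forall_not_mem.mpr
      intro x hx
      rw [hmemw x, hfl] at hx
      exact absurd hx (List.not_mem_nil)
    simp [this, PySem.List.sorted]
  · have hpw : (w :: adjDedup w t).Pairwise (· < ·) := by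
      apply pairwise_cons_adjDedup
      have := PySem.List.sorted_pairwise lists.flatten (fun x => x)
      rw [hs] at this
      exact this
    apply PySem.List.sorted_eq_of_perm_of_pairwise_lt
    · apply (List.perm_ext_iff_of_nodup ?_ hnodw).mpr
      · intro x
        rw [hmemw x]
        have hmem := mem_cons_adjDedup t w x
        have hms : x ∈ w :: t ↔ x ∈ lists.flatten := by
          rw [← hs, PySem.List.mem_sorted]
        rw [hmem, hms]
      · exact hpw.imp fun h => ne_of_lt h
    · exact hpw
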